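-- pv_equiv track=rewrite | github.com/mashalas/file_tools | fresh_files_processor/fresh_files_processor.py | get_last_word
-- ===== SOURCE A (Python) =====
-- def get_last_word(s, allow_lower_letters = True, allow_upper_letters = True, allow_digits = True):
--     LOWER_LETTERS = "abcdefghijklmnopqrstuvwxyz"
--     UPPER_LETTERS = "ABCDEFGHIJKLMNOPQRSTUVWXYZ"
--     DIGITS = "0123456789"
--     allowed = ""
--     if allow_lower_letters:
--         allowed += LOWER_LETTERS
--     if allow_upper_letters:
--         allowed += UPPER_LETTERS
--     if allow_digits:
--         allowed += DIGITS
--     result = ""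
--     while len(s) > 0 and s[-1] in allowed:
--         result = s[-1] + result
--         s = s[0:len(s)-1]
--     return result
-- ===== SOURCE B (Python) =====
-- def get_last_word(s, allow_lower_letters = True, allow_upper_letters = True, allow_digits = True):
--     # One forward pass: remember the position just after the last disallowed
--     # character; the answer is the slice from there to the end.
--     start = 0
--     for i, c in enumerate(s):
--         if not ((allow_lower_letters and 'a' <= c <= 'z')
--                 or (allow_upper_letters and 'A' <= c <= 'Z')
--                 or (allow_digits and '0' <= c <= '9')):
--             start = i + 1
--     return s[start:]
-- ===== Notes on version B (the rewrite author's own statement) =====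
-- stated objective: alternative
-- what changed: A strips characters off the end one at a time, rebuilding both the shrinking string and the growing result on every step; B makes a single forward pass recording the position just after the last disallowed character and returns one slice.
import Mathlib
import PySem

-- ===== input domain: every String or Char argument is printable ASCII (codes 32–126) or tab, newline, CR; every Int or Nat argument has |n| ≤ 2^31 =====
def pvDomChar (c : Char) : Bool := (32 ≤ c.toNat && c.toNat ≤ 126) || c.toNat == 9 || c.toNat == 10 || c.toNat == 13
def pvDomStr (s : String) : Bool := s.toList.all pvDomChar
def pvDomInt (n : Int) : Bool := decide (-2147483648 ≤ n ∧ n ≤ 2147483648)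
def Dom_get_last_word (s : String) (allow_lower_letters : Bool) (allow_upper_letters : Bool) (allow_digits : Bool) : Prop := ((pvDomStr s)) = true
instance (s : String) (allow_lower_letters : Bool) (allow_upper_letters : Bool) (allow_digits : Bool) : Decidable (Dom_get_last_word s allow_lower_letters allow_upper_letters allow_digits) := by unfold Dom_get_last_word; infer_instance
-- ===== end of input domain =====

-- B replaces A's backward strip-and-prepend loop (which rebuilds both strings each step)
-- by a single forward pass that records the position after the last disallowed character,
-- followed by one slice; both are proved to return the maximal allowed trailing run.

-- ===== PORT A =====
-- the while loop: state is (s, result); s[-1] is pyGetD s (-1); s = s[0:len(s)-1] is dropLast (exact here: the bounds are 0 and len-1 with len ≥ 1)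
def glwLoopA (s : List Char) (result : List Char) (allowed : List Char) : List Char :=
  if h : s.length > 0 ∧ PySem.List.pyGetD s (-1) ' ' ∈ allowed then
    glwLoopA s.dropLast (PySem.List.pyGetD s (-1) ' ' :: result) allowed
  else result
termination_by s.length
decreasing_by simp only [List.length_dropLast]; omega

def get_last_word (s : String) (allow_lower_letters : Bool) (allow_upper_letters : Bool) (allow_digits : Bool) : String :=
  let LOWER_LETTERS := "abcdefghijklmnopqrstuvwxyz".toList
  let UPPER_LETTERS := "ABCDEFGHIJKLMNOPQRSTUVWXYZ".toList
  let DIGITS := "0123456789".toList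
  let allowed : List Char := []
  let allowed := if allow_lower_letters then allowed ++ LOWER_LETTERS else allowed
  let allowed := if allow_upper_letters then allowed ++ UPPER_LETTERS else allowed
  let allowed := if allow_digits then allowed ++ DIGITS else allowed
  String.mk (glwLoopA s.toList [] allowed)

-- ===== PORT B =====
def glwOk (allow_lower_letters allow_upper_letters allow_digits : Bool) (c : Char) : Bool :=
  (allow_lower_letters && ('a' ≤ c && c ≤ 'z'))
  || (allow_upper_letters && ('A' ≤ c && c ≤ 'Z'))
  || (allow_digits && ('0' ≤ c && c ≤ '9'))

def get_last_word_alt (s : String) (allow_lower_letters : Bool) (allow_upper_letters : Bool) (allow_digits : Bool) : String :=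
  let cs := s.toList
  let start : Int :=
    (PySem.List.enumerate cs 0).foldl
      (fun st p => if ¬ glwOk allow_lower_letters allow_upper_letters allow_digits p.2 then p.1 + 1 else st) 0
  String.mk (PySem.List.slice cs (some start) none)

-- ===== PRECONDITION & SPEC =====
def Spec_get_last_word (s : String) (allow_lower_letters : Bool) (allow_upper_letters : Bool) (allow_digits : Bool) (out : String) : Prop := out = get_last_word_alt s allow_lower_letters allow_upper_letters allow_digits
instance (s : String) (allow_lower_letters : Bool) (allow_upper_letters : Bool) (allow_digits : Bool) (out : String) : Decidable (Spec_get_last_word s allow_lower_letters allow_upper_letters allow_digits out) := by unfold Spec_get_last_word; infer_instance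

-- ===== CLAIM (what is proved, stated in full; the proofs are below) =====
def Claim_equal_get_last_word : Prop := ∀ (s : String) (allow_lower_letters : Bool) (allow_upper_letters : Bool) (allow_digits : Bool), Dom_get_last_word s allow_lower_letters allow_upper_letters allow_digits → Spec_get_last_word s allow_lower_letters allow_upper_letters allow_digits (get_last_word s allow_lower_letters allow_upper_letters allow_digits)

-- ===== LEMMAS AND PROOFS =====

lemma char_eq_iff_toNat (c d : Char) : c = d ↔ c.toNat = d.toNat := by
  constructor
  · rintro rfl; rfl
  · intro h
    have h1 := Char.ofNat_toNat c
    have h2 := Char.ofNat_toNat d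
    rw [← h1, ← h2, h]

-- A's loop returns the maximal allowed suffix, prepended to the accumulator
lemma glwLoopA_eq (alw : List Char) : ∀ (cs r : List Char),
    glwLoopA cs r alw = (cs.reverse.takeWhile (fun c => decide (c ∈ alw))).reverse ++ r := by
  intro cs
  induction cs using List.reverseRecOn with
  | nil => intro r; simp [glwLoopA]
  | append_singleton xs x ih =>
    intro r
    rw [glwLoopA]
    by_cases hx : x ∈ alw
    · simp [PySem.List.pyGetD_neg_one_append_singleton, hx, ih]
    · simp [PySem.List.pyGetD_neg_one_append_singleton, hx]

-- B's fold computes the string's length minus the length of that suffix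
lemma foldB_eq (ok : Char → Bool) : ∀ (cs : List Char),
    (PySem.List.enumerate cs 0).foldl (fun st p => if ¬ ok p.2 then p.1 + 1 else st) 0
      = (cs.length : Int) - (cs.reverse.takeWhile ok).length := by
  intro cs
  induction cs using List.reverseRecOn with
  | nil => simp [PySem.List.enumerate]
  | append_singleton xs x ih =>
    rw [PySem.List.enumerate_append, List.foldl_append, ih]
    by_cases hx : ok x = true
    · simp [PySem.List.enumerate, hx]
    · simp [PySem.List.enumerate, hx]

-- the two character tests agree once the allowed string is assembled
lemma ok_eq_mem (a b c : Bool) :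
    (fun ch => decide (ch ∈ (if c then (if b then (if a then ([] : List Char) ++ "abcdefghijklmnopqrstuvwxyz".toList else []) ++ "ABCDEFGHIJKLMNOPQRSTUVWXYZ".toList else (if a then ([] : List Char) ++ "abcdefghijklmnopqrstuvwxyz".toList else [])) ++ "0123456789".toList else (if b then (if a then ([] : List Char) ++ "abcdefghijklmnopqrstuvwxyz".toList else []) ++ "ABCDEFGHIJKLMNOPQRSTUVWXYZ".toList else (if a then ([] : List Char) ++ "abcdefghijklmnopqrstuvwxyz".toList else [])))))
      = glwOk a b c := by
  funext ch
  apply Bool.eq_iff_iff.mpr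
  cases a <;> cases b <;> cases c <;>
    simp [glwOk] <;>
    simp only [char_eq_iff_toNat, Char.le_def, UInt32.le_iff_toNat_le, Char.toNat,
      show ('a'.val.toNat = 97) from rfl, show ('b'.val.toNat = 98) from rfl, show ('c'.val.toNat = 99) from rfl, show ('d'.val.toNat = 100) from rfl, show ('e'.val.toNat = 101) from rfl, show ('f'.val.toNat = 102) from rfl, show ('g'.val.toNat = 103) from rfl, show ('h'.val.toNat = 104) from rfl, show ('i'.val.toNat = 105) from rfl, show ('j'.val.toNat = 106) from rfl, show ('k'.val.toNat = 107) from rfl, show ('l'.val.toNat = 108) from rfl, show ('m'.val.toNat = 109) from rfl, show ('n'.val.toNat = 110) from rfl, show ('o'.val.toNat = 111) from rfl, show ('p'.val.toNat = 112) from rfl, show ('q'.val.toNat = 113) from rfl, show ('r'.val.toNat = 114) from rfl, show ('s'.val.toNat = 115) from rfl, show ('t'.val.toNat = 116) from rfl, show ('u'.val.toNat = 117) from rfl, show ('v'.val.toNat = 118) from rfl, show ('w'.val.toNat = 119) from rfl, show ('x'.val.toNat = 120) from rfl, show ('y'.val.toNat = 121) from rfl, show ('z'.val.toNat = 122) from rfl,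 show ('A'.val.toNat = 65) from rfl, show ('B'.val.toNat = 66) from rfl, show ('C'.val.toNat = 67) from rfl, show ('D'.val.toNat = 68) from rfl, show ('E'.val.toNat = 69) from rfl, show ('F'.val.toNat = 70) from rfl, show ('G'.val.toNat = 71) from rfl, show ('H'.val.toNat = 72) from rfl, show ('I'.val.toNat = 73) from rfl, show ('J'.val.toNat = 74) from rfl, show ('K'.val.toNat = 75) from rfl, show ('L'.val.toNat = 76) from rfl, show ('M'.val.toNat = 77) from rfl, show ('N'.val.toNat = 78) from rfl, show ('O'.val.toNat = 79) from rfl, show ('P'.val.toNat = 80) from rfl, show ('Q'.val.toNat = 81) from rfl, show ('R'.val.toNat = 82) from rfl, show ('S'.val.toNat = 83) from rfl, show ('T'.val.toNat = 84) from rfl, show ('U'.val.toNat = 85) from rfl, show ('V'.val.toNat = 86) from rfl, show ('W'.val.toNat = 87) from rfl, show ('X'.val.toNat = 88) from rfl, show ('Y'.val.toNat = 89) from rfl, show ('Z'.val.toNat = 90) from rfl, show ('0'.val.toNat = 48) from rfl, show ('1'.val.toNat = 49) from rfl, show ('2'.val.toNat = 50) from rfl, show ('3'.val.toNat = 51) from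 rfl, show ('4'.val.toNat = 52) from rfl, show ('5'.val.toNat = 53) from rfl, show ('6'.val.toNat = 54) from rfl, show ('7'.val.toNat = 55) from rfl, show ('8'.val.toNat = 56) from rfl, show ('9'.val.toNat = 57) from rfl] <;>
    omega

-- drop (n - k) recovers the reversed takeWhile of the reverse
lemma drop_sub_takeWhile (ok : Char → Bool) (cs : List Char) :
    cs.drop (cs.length - (cs.reverse.takeWhile ok).length) = (cs.reverse.takeWhile ok).reverse := by
  obtain ⟨rest, hrest⟩ := (List.takeWhile_prefix (p := ok) (l := cs.reverse))
  have key : ∀ t rest : List Char, t ++ rest = cs.reverse →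
      cs.drop (cs.length - t.length) = t.reverse := by
    intro t rest h
    have hcs : cs = rest.reverse ++ t.reverse := by
      have := congrArg List.reverse h
      simpa using this.symm
    rw [hcs]
    have hlen : (rest.reverse ++ t.reverse).length - t.length = rest.reverse.length := by simp
    rw [hlen]
    exact List.drop_left
  exact key _ rest hrest

-- ===== VERDICT (by name: the statement is the Claim_ definition above) =====
theorem get_last_word_spec : Claim_equal_get_last_word := by
  intro s a b c _
  unfold Spec_get_last_word get_last_word get_last_word_alt
  simp only []
  rw [glwLoopA_eq, foldB_eq (glwOk a b c), ok_eq_mem a b c]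
  set cs := s.toList
  set k := (cs.reverse.takeWhile (glwOk a b c)).length with hk
  have hle : k ≤ cs.length := by
    simpa [hk] using (List.takeWhile_prefix (p := glwOk a b c) (l := cs.reverse)).length_le
  have hcast : (cs.length : Int) - (k : Int) = ((cs.length - k : Nat) : Int) := by omega
  rw [hcast, PySem.List.slice_from_natCast, drop_sub_takeWhile]
  simp
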